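-- pv_equiv track=rewrite | github.com/YarosLove91/ALU_discrete_ic | theory/virtual_fpga_boards-stand_ALU_8b/app.py | process_display_value
-- ===== SOURCE A (Python) =====
-- def process_display_value(value):
--     """
--     Преобразует 8-битное значение в состояния сегментов индикатора
--     Args:
--         value (int): Числовое значение для отображения (0-255)
--     Returns:
--         list: Состояния 7 сегментов (1 - включен, 0 - выключен)
--     """
--     if value == -1:
--         return [0] * 8
--
--     value = value & 0xFF
--     if value == 0:
--         return [0] * 8
--
--     binary_str = format(value, '08b')
--     reversed_str = binary_str[::-1]
--     inverted_str = ''.join(['1' if bit == '0' else '0' for bit in reversed_str])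
--     segments_state = [int(bit) for bit in inverted_str]
--     return segments_state
-- ===== SOURCE B (Python) =====
-- def process_display_value(value):
--     v = value & 0xFF
--     if v == 0:
--         return [0] * 8
--     return [0 if (v >> i) & 1 else 1 for i in range(8)]
-- ===== Notes on version B (the rewrite author's own statement) =====
-- stated objective: simpler
-- what changed: B replaces A's format/reverse/invert string pipeline (and the redundant -1 guard) with direct bit arithmetic: mask to 8 bits and emit 0/1 per bit via shifts.
import Mathlib
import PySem

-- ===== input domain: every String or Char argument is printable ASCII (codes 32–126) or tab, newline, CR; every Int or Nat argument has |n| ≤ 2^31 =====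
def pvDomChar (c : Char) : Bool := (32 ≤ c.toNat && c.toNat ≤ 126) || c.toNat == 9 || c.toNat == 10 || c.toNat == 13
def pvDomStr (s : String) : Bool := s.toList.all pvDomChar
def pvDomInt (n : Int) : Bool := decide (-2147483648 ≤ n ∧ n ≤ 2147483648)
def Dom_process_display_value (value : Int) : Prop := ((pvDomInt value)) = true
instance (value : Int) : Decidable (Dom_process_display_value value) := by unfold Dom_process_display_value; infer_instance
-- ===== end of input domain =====

-- B drops A's string format/reverse/invert pipeline and computes the segment list
-- directly by bit arithmetic (objective: simpler; A's redundant -1 guard is absorbed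
-- by the v == 0 test since -1 & 0xFF = 255 inverts to all zeros anyway).


-- ===== PORT A =====
def process_display_value (value : Int) : List Int :=
  if value = -1 then List.replicate 8 (0 : Int)
  else
    let v := PySem.Int.band value 255
    if v = 0 then List.replicate 8 (0 : Int)
    else
      -- format(v, '08b'): hand port, exact for 0 ≤ v < 256 (which band value 255 guarantees):
      -- eight binary digit characters, most significant first
      let binary_str : List Char := (List.range 8).map (fun i => if (v >>> (7 - i)) % 2 = 1 then '1' else '0')
      let reversed_str := binary_str.reverse
      let inverted_str := reversed_str.map (fun bit => if bit = '0' then '1' else '0')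
      -- int(bit): hand port, exact since every bit here is '0' or '1'
      inverted_str.map (fun bit => if bit = '1' then (1 : Int) else 0)

-- ===== PORT B =====
def process_display_value_alt (value : Int) : List Int :=
  let v := PySem.Int.band value 255
  if v = 0 then List.replicate 8 (0 : Int)
  else (List.range 8).map (fun i => if PySem.Int.band (v >>> i) 1 = 1 then (0 : Int) else 1)

-- ===== PRECONDITION & SPEC =====
def Spec_process_display_value (value : Int) (out : List Int) : Prop := out = process_display_value_alt value
instance (value : Int) (out : List Int) : Decidable (Spec_process_display_value value out) := by unfold Spec_process_display_value; infer_instance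

-- ===== CLAIM (what is proved, stated in full; the proofs are below) =====
def Claim_equal_process_display_value : Prop := ∀ (value : Int), Dom_process_display_value value → Spec_process_display_value value (process_display_value value)

-- ===== LEMMAS AND PROOFS =====

-- A's post-masking body (proof helper; the port is defined above, not via this)
def pvBodyA (v : Int) : List Int :=
  if v = 0 then List.replicate 8 (0 : Int)
  else
    let binary_str : List Char := (List.range 8).map (fun i => if (v >>> (7 - i)) % 2 = 1 then '1' else '0')
    let reversed_str := binary_str.reverse
    let inverted_str := reversed_str.map (fun bit => if bit = '0' then '1' else '0')
    inverted_str.map (fun bit => if bit = '1' then (1 : Int) else 0)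

-- B's post-masking body (proof helper)
def pvBodyB (v : Int) : List Int :=
  if v = 0 then List.replicate 8 (0 : Int)
  else (List.range 8).map (fun i => if PySem.Int.band (v >>> i) 1 = 1 then (0 : Int) else 1)

set_option maxRecDepth 8192 in
lemma pvBody_eq : ∀ n : Fin 256, pvBodyA ((n : Nat) : Int) = pvBodyB ((n : Nat) : Int) := by decide

lemma pvBand255_lt (a : Int) : 0 ≤ PySem.Int.band a 255 ∧ PySem.Int.band a 255 < 256 := by
  unfold PySem.Int.band
  by_cases h : 0 ≤ a
  · rw [if_pos h, if_pos (by norm_num)]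
    have ht : (255 : Int).toNat = 255 := rfl
    have h8 := Nat.and_two_pow_sub_one_eq_mod a.toNat 8
    rw [ht]
    norm_num at h8
    omega
  · rw [if_neg h, if_pos (by norm_num)]
    have ht : (255 : Int).toNat = 255 := rfl
    have h8 := Nat.and_two_pow_sub_one_eq_mod (-a - 1).toNat 8
    have hc : (255 : Nat) &&& (-a - 1).toNat = (-a - 1).toNat &&& 255 := Nat.land_comm _ _
    rw [ht, hc]
    norm_num at h8
    omega

-- ===== VERDICT (by name: the statement is the Claim_ definition above) =====
theorem process_display_value_spec : Claim_equal_process_display_value := by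
  intro value _
  unfold Spec_process_display_value
  have hA : process_display_value value
      = if value = -1 then List.replicate 8 (0 : Int) else pvBodyA (PySem.Int.band value 255) := rfl
  have hB : process_display_value_alt value = pvBodyB (PySem.Int.band value 255) := rfl
  obtain ⟨h0, h1⟩ := pvBand255_lt value
  have hbody : pvBodyA (PySem.Int.band value 255) = pvBodyB (PySem.Int.band value 255) := by
    have := pvBody_eq ⟨(PySem.Int.band value 255).toNat, by omega⟩
    simpa [Int.toNat_of_nonneg h0] using this
  rw [hA, hB]
  by_cases hm1 : value = -1
  · rw [if_pos hm1, hm1]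
    decide
  · rw [if_neg hm1, hbody]
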